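-- pv_equiv track=rewrite | github.com/Gnosis-MEP/Model-Trainer | model_trainer/create_dataset_eval_confs.py | get_total_ois_and_others_cls_for_annotation
-- ===== SOURCE A (Python) =====
-- def get_total_ois_and_others_cls_for_annotation(annotation, ois_cls_ids, other_classes_ids):
--     ois_set = set()
--     others_set = set()
--     for obj in annotation['data']:
--         if obj['class_id'] in ois_cls_ids:
--             ois_set.add(obj['class_id'])
--         elif obj['class_id'] in other_classes_ids:
--             others_set.add(obj['class_id'])
--
--     total_ois = len(ois_set)
--     total_other = len(others_set)
--
--     return total_ois, total_other
-- ===== SOURCE B (Python) =====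
-- def _merge_count(xs, ys):
--     # xs, ys strictly increasing; counts common elements by a two-pointer merge scan
--     i = j = n = 0
--     while i < len(xs) and j < len(ys):
--         if xs[i] == ys[j]:
--             n += 1
--             i += 1
--             j += 1
--         elif xs[i] < ys[j]:
--             i += 1
--         else:
--             j += 1
--     return n
--
--
-- def get_total_ois_and_others_cls_for_annotation(annotation, ois_cls_ids, other_classes_ids):
--     present = sorted({obj['class_id'] for obj in annotation['data']})
--     ois_sorted = sorted(set(ois_cls_ids))
--     others_sorted = sorted(set(other_classes_ids) - set(ois_cls_ids))
--     return _merge_count(present, ois_sorted), _merge_count(present, others_sorted)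
-- ===== Notes on version B (the rewrite author's own statement) =====
-- stated objective: alternative
-- what changed: Replaces A's per-element if/elif loop maintaining two mutable sets by sorting the distinct present ids and the two (priority-adjusted) candidate id lists and counting each intersection with a two-pointer merge scan, with no membership tests in the counting phase.
import Mathlib
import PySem

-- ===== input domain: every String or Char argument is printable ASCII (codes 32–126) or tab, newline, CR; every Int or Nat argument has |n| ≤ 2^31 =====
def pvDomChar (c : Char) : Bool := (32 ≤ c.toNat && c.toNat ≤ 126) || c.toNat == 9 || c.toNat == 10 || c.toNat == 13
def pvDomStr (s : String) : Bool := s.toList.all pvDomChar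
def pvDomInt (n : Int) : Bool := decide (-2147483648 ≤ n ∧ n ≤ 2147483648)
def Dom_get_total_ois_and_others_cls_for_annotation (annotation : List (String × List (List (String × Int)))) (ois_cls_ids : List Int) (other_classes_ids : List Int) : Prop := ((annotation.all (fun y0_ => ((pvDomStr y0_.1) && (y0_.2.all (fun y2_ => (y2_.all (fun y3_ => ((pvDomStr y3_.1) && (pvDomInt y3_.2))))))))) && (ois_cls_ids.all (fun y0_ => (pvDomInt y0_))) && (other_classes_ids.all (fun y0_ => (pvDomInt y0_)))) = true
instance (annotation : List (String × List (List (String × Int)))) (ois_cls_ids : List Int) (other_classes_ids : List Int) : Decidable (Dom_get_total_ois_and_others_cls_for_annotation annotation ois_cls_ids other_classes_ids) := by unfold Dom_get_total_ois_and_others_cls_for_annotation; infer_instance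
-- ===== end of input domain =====

-- Equivalence of return values; B sorts the distinct present / candidate ids and counts each
-- intersection by a two-pointer merge scan instead of A's if/elif loop over two accumulator sets.

-- ===== PORT A =====
def pvClsId (obj : List (String × Int)) : Int := (PySem.Dict.mk obj).getD "class_id" 0

def pvLoopA (ois_cls_ids other_classes_ids : List Int) (data : List (List (String × Int)))
    (st : PySem.Set Int × PySem.Set Int) : PySem.Set Int × PySem.Set Int :=
  data.foldl (fun st obj =>
    let cid := pvClsId obj
    if cid ∈ ois_cls_ids then (PySem.Set.add st.1 cid, st.2)
    else if cid ∈ other_classes_ids then (st.1, PySem.Set.add st.2 cid)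
    else st) st

def get_total_ois_and_others_cls_for_annotation (annotation : List (String × List (List (String × Int)))) (ois_cls_ids : List Int) (other_classes_ids : List Int) : Int × Int :=
  let data := (PySem.Dict.mk annotation).getD "data" []
  let st := pvLoopA ois_cls_ids other_classes_ids data (PySem.Set.empty, PySem.Set.empty)
  (PySem.Set.len st.1, PySem.Set.len st.2)

-- ===== PORT B =====
-- Source B's while loop over indices i, j, transcribed as the obvious recursion on the list suffixes.
def pvMergeCount : List Int → List Int → Int
  | x :: xs, y :: ys =>
    if x = y then 1 + pvMergeCount xs ys
    else if x < y then pvMergeCount xs (y :: ys)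
    else pvMergeCount (x :: xs) ys
  | _, _ => 0

def get_total_ois_and_others_cls_for_annotation_alt (annotation : List (String × List (List (String × Int)))) (ois_cls_ids : List Int) (other_classes_ids : List Int) : Int × Int :=
  let present := PySem.List.sorted (PySem.Set.ofList (((PySem.Dict.mk annotation).getD "data" []).map pvClsId)) (fun x => x) false
  let ois_sorted := PySem.List.sorted (PySem.Set.ofList ois_cls_ids) (fun x => x) false
  let others_sorted := PySem.List.sorted (PySem.Set.diff (PySem.Set.ofList other_classes_ids) (PySem.Set.ofList ois_cls_ids)) (fun x => x) false
  (pvMergeCount present ois_sorted, pvMergeCount present others_sorted)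

-- ===== PRECONDITION & SPEC =====
-- Pre_ excludes exactly the inputs where Python A raises KeyError: a missing 'data' key, or an object without 'class_id'.
def Pre_get_total_ois_and_others_cls_for_annotation (annotation : List (String × List (List (String × Int)))) (ois_cls_ids : List Int) (other_classes_ids : List Int) : Prop :=
  ((PySem.Dict.mk annotation).get? "data").isSome = true ∧
  ∀ obj ∈ (PySem.Dict.mk annotation).getD "data" [], ((PySem.Dict.mk obj).get? "class_id").isSome = true
instance (annotation : List (String × List (List (String × Int)))) (ois_cls_ids : List Int) (other_classes_ids : List Int) : Decidable (Pre_get_total_ois_and_others_cls_for_annotation annotation ois_cls_ids other_classes_ids) := by unfold Pre_get_total_ois_and_others_cls_for_annotation; infer_instance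

def pvWitness_get_total_ois_and_others_cls_for_annotation : (List (String × List (List (String × Int)))) × List Int × List Int :=
  ([("data", [[("class_id", 1)], [("class_id", 2)]])], [1], [2])

def Spec_get_total_ois_and_others_cls_for_annotation (annotation : List (String × List (List (String × Int)))) (ois_cls_ids : List Int) (other_classes_ids : List Int) (out : Int × Int) : Prop := out = get_total_ois_and_others_cls_for_annotation_alt annotation ois_cls_ids other_classes_ids
instance (annotation : List (String × List (List (String × Int)))) (ois_cls_ids : List Int) (other_classes_ids : List Int) (out : Int × Int) : Decidable (Spec_get_total_ois_and_others_cls_for_annotation annotation ois_cls_ids other_classes_ids out) := by unfold Spec_get_total_ois_and_others_cls_for_annotation; infer_instance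

-- ===== CLAIM (what is proved, stated in full; the proofs are below) =====
def Claim_equal_get_total_ois_and_others_cls_for_annotation : Prop := ∀ (annotation : List (String × List (List (String × Int)))) (ois_cls_ids : List Int) (other_classes_ids : List Int), Dom_get_total_ois_and_others_cls_for_annotation annotation ois_cls_ids other_classes_ids → Pre_get_total_ois_and_others_cls_for_annotation annotation ois_cls_ids other_classes_ids → Spec_get_total_ois_and_others_cls_for_annotation annotation ois_cls_ids other_classes_ids (get_total_ois_and_others_cls_for_annotation annotation ois_cls_ids other_classes_ids)

-- ===== LEMMAS AND PROOFS =====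

theorem pvLoopA_cons (ois other : List Int) (obj : List (String × Int))
    (rest : List (List (String × Int))) (st : PySem.Set Int × PySem.Set Int) :
    pvLoopA ois other (obj :: rest) st =
      pvLoopA ois other rest
        (if pvClsId obj ∈ ois then (PySem.Set.add st.1 (pvClsId obj), st.2)
         else if pvClsId obj ∈ other then (st.1, PySem.Set.add st.2 (pvClsId obj)) else st) := rfl

-- Invariant of A's loop: both sets stay nodup and their membership is characterised.
theorem pvLoopA_spec (ois other : List Int) (data : List (List (String × Int)))
    (s1 s2 : PySem.Set Int) (h1 : s1.Nodup) (h2 : s2.Nodup) :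
    (pvLoopA ois other data (s1, s2)).1.Nodup ∧ (pvLoopA ois other data (s1, s2)).2.Nodup ∧
    (∀ x, x ∈ (pvLoopA ois other data (s1, s2)).1 ↔ x ∈ s1 ∨ (x ∈ data.map pvClsId ∧ x ∈ ois)) ∧
    (∀ x, x ∈ (pvLoopA ois other data (s1, s2)).2 ↔ x ∈ s2 ∨ (x ∈ data.map pvClsId ∧ x ∉ ois ∧ x ∈ other)) := by
  induction data generalizing s1 s2 with
  | nil => simp [pvLoopA, h1, h2]
  | cons obj rest ih =>
    rw [pvLoopA_cons]
    by_cases hoi : pvClsId obj ∈ ois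
    · rw [if_pos hoi]
      obtain ⟨n1, n2, m1, m2⟩ := ih (PySem.Set.add s1 (pvClsId obj)) s2 (PySem.Set.nodup_add _ _ h1) h2
      refine ⟨n1, n2, fun x => ?_, fun x => ?_⟩
      · rw [m1 x]
        by_cases hx : x = pvClsId obj
        · subst hx; simp [PySem.Set.mem_add, hoi]
        · simp only [PySem.Set.mem_add, List.map_cons, List.mem_cons]; tauto
      · rw [m2 x]
        by_cases hx : x = pvClsId obj
        · subst hx; simp [hoi]
        · simp only [List.map_cons, List.mem_cons]; tauto
    · by_cases hot : pvClsId obj ∈ other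
      · rw [if_neg hoi, if_pos hot]
        obtain ⟨n1, n2, m1, m2⟩ := ih s1 (PySem.Set.add s2 (pvClsId obj)) h1 (PySem.Set.nodup_add _ _ h2)
        refine ⟨n1, n2, fun x => ?_, fun x => ?_⟩
        · rw [m1 x]
          by_cases hx : x = pvClsId obj
          · subst hx; simp [hoi]
          · simp only [List.map_cons, List.mem_cons]; tauto
        · rw [m2 x]
          by_cases hx : x = pvClsId obj
          · subst hx; simp [PySem.Set.mem_add, hoi, hot]
          · simp only [PySem.Set.mem_add, List.map_cons, List.mem_cons]; tauto
      · rw [if_neg hoi, if_neg hot]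
        obtain ⟨n1, n2, m1, m2⟩ := ih s1 s2 h1 h2
        refine ⟨n1, n2, fun x => ?_, fun x => ?_⟩
        · rw [m1 x]
          by_cases hx : x = pvClsId obj
          · subst hx; simp [hoi]
          · simp only [List.map_cons, List.mem_cons]; tauto
        · rw [m2 x]
          by_cases hx : x = pvClsId obj
          · subst hx; simp [hoi, hot]
          · simp only [List.map_cons, List.mem_cons]; tauto

theorem pv_len_eq_of_nodup_of_mem_iff (l1 l2 : List Int) (h1 : l1.Nodup) (h2 : l2.Nodup)
    (h : ∀ x, x ∈ l1 ↔ x ∈ l2) : PySem.Set.len l1 = (l2.length : Int) := by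
  have : l1.Perm l2 := (List.perm_ext_iff_of_nodup h1 h2).mpr h
  simp [PySem.Set.len, this.length_eq]

-- sorted of a nodup list (identity key) is strictly increasing
theorem pv_sorted_pairwise_lt (l : List Int) (h : l.Nodup) :
    (PySem.List.sorted l (fun x => x) false).Pairwise (· < ·) := by
  have hp := PySem.List.sorted_pairwise l (fun x => x) (α := Int)
  have hn : (PySem.List.sorted l (fun x => x) false).Nodup :=
    (PySem.List.sorted_perm l (fun x => x) false).nodup_iff.mpr h
  exact List.Pairwise.imp₂ (fun a b hle hne => lt_of_le_of_ne hle hne) hp hn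

-- the merge scan on strictly increasing lists counts xs's elements present in ys
theorem pvMergeCount_eq (xs ys : List Int) (hx : xs.Pairwise (· < ·)) (hy : ys.Pairwise (· < ·)) :
    pvMergeCount xs ys = ((xs.filter (fun x => decide (x ∈ ys))).length : Int) := by
  induction xs, ys using pvMergeCount.induct with
  | case1 xs y ys ih =>
    have hxx := (List.pairwise_cons.mp hx).1
    have hx' := (List.pairwise_cons.mp hx).2
    have hy' := (List.pairwise_cons.mp hy).2
    rw [pvMergeCount, if_pos rfl, ih hx' hy']
    have hcongr : xs.filter (fun a => decide (a ∈ y :: ys)) = xs.filter (fun a => decide (a ∈ ys)) := by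
      apply List.filter_congr
      intro a ha
      have : y < a := hxx a ha
      simp [List.mem_cons, ne_of_gt this]
    have hstep : List.filter (fun a => decide (a ∈ y :: ys)) (y :: xs)
        = y :: List.filter (fun a => decide (a ∈ ys)) xs := by
      rw [List.filter_cons, if_pos (by simp), hcongr]
    rw [hstep, List.length_cons]
    push_cast
    ring
  | case2 x xs y ys hne hlt ih =>
    have hx' := (List.pairwise_cons.mp hx).2
    rw [pvMergeCount, if_neg hne, if_pos hlt, ih hx' hy]
    have hyy := (List.pairwise_cons.mp hy).1
    have h1 : x ∉ ys := fun h => absurd (hyy x h) (not_lt.mpr (le_of_lt hlt))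
    simp [hne, h1]
  | case3 x xs y ys hne hnlt ih =>
    have hy' := (List.pairwise_cons.mp hy).2
    rw [pvMergeCount, if_neg hne, if_neg hnlt, ih hx hy']
    have hgt : y < x := lt_of_le_of_ne (not_lt.mp hnlt) (fun h => hne h.symm)
    have hxx := (List.pairwise_cons.mp hx).1
    have hcongr : (x :: xs).filter (fun a => decide (a ∈ y :: ys)) = (x :: xs).filter (fun a => decide (a ∈ ys)) := by
      apply List.filter_congr
      intro a ha
      have hya : y < a := by
        rcases List.mem_cons.mp ha with h | h
        · exact h ▸ hgt
        · exact lt_trans hgt (hxx a h)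
      simp [List.mem_cons, ne_of_gt hya]
    rw [hcongr]
  | case4 xs ys hnc =>
    match xs, ys with
    | [], ys => simp [pvMergeCount]
    | x :: xs, [] => simp [pvMergeCount]
    | x :: xs, y :: ys => exact absurd (hnc x xs y ys rfl rfl) (fun h => h)

-- ===== VERDICT (by name: the statement is the Claim_ definition above) =====
theorem get_total_ois_and_others_cls_for_annotation_spec : Claim_equal_get_total_ois_and_others_cls_for_annotation := by
  intro annotation ois other _ _
  unfold Spec_get_total_ois_and_others_cls_for_annotation
  unfold get_total_ois_and_others_cls_for_annotation get_total_ois_and_others_cls_for_annotation_alt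
  dsimp only
  set data := (PySem.Dict.mk annotation).getD "data" [] with hdata
  have hA := pvLoopA_spec ois other data PySem.Set.empty PySem.Set.empty List.nodup_nil List.nodup_nil
  set present := PySem.List.sorted (PySem.Set.ofList (data.map pvClsId)) (fun x => x) false with hpres
  have hpn : present.Nodup :=
    (PySem.List.sorted_perm _ _ false).nodup_iff.mpr (PySem.Set.nodup_ofList _)
  have hplt : present.Pairwise (· < ·) :=
    pv_sorted_pairwise_lt _ (PySem.Set.nodup_ofList _)
  have hmem_present : ∀ x, x ∈ present ↔ x ∈ data.map pvClsId := by
    intro x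
    rw [hpres, PySem.List.mem_sorted, PySem.Set.mem_ofList]
  refine Prod.ext ?_ ?_
  · rw [pvMergeCount_eq _ _ hplt (pv_sorted_pairwise_lt _ (PySem.Set.nodup_ofList _))]
    apply pv_len_eq_of_nodup_of_mem_iff _ _ hA.1 (hpn.filter _)
    intro x
    rw [hA.2.2.1 x]
    simp only [List.mem_filter, decide_eq_true_eq, PySem.List.mem_sorted, PySem.Set.mem_ofList,
      hmem_present, PySem.Set.empty]
    simp
  · rw [pvMergeCount_eq _ _ hplt (pv_sorted_pairwise_lt _ (PySem.Set.nodup_diff _ _ (PySem.Set.nodup_ofList _)))]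
    apply pv_len_eq_of_nodup_of_mem_iff _ _ hA.2.1 (hpn.filter _)
    intro x
    rw [hA.2.2.2 x]
    simp only [List.mem_filter, decide_eq_true_eq, PySem.List.mem_sorted, PySem.Set.mem_diff,
      PySem.Set.mem_ofList, hmem_present, PySem.Set.empty]
    simp
    tauto
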